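-- pv_equiv track=rewrite | github.com/mm0070/FlightDataUtilities | flightdatautilities/patterns.py | expand_combinations
-- ===== SOURCE A (Python) =====
-- import itertools
--
-- def expand_combinations(pattern_count, parameters):
--     '''
--     Expand parameters into unique combinations.
--
--     expand_combinations(2, ['Altitude Radio (A)',
--                             'Altitude Radio (B)',
--                             'Altitude Radio (C)'])
--     Result:
--     [['Altitude Radio (A)', 'Altitude Radio (B)'],
--      ['Altitude Radio (A)', 'Altitude Radio (C)'],
--      ['Altitude Radio (B)', 'Altitude Radio (C)']]
--     '''
--     sorted_combinations = []
--     for combination in itertools.product(*[parameters] * pattern_count):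
--         if all([p == combination[0] for p in combination[1:]]):
--             continue
--         sorted_combination = sorted(combination)
--         if sorted_combination not in sorted_combinations:
--             sorted_combinations.append(sorted_combination)
--     return sorted_combinations
-- ===== SOURCE B (Python) =====
-- # B: iterate combinations_with_replacement instead of the full cartesian product,
-- # and dedup with a set of seen keys instead of scanning the result list.
-- import itertools
--
-- def expand_combinations(pattern_count, parameters):
--     if pattern_count < 2:
--         return []
--     result = []
--     seen = set()
--     for combo in itertools.combinations_with_replacement(parameters, pattern_count):
--         if all(p == combo[0] for p in combo[1:]):
--             continue
--         key = tuple(sorted(combo))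
--         if key not in seen:
--             seen.add(key)
--             result.append(list(key))
--     return result
-- ===== Notes on version B (the rewrite author's own statement) =====
-- stated objective: alternative
-- what changed: B enumerates combinations_with_replacement (nondecreasing index tuples) instead of the full n^k cartesian product and deduplicates with a set of seen keys instead of rescanning the result list (intended as faster; a timing run could not get a clean reading at the largest size, so no speed is claimed).
import Mathlib
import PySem

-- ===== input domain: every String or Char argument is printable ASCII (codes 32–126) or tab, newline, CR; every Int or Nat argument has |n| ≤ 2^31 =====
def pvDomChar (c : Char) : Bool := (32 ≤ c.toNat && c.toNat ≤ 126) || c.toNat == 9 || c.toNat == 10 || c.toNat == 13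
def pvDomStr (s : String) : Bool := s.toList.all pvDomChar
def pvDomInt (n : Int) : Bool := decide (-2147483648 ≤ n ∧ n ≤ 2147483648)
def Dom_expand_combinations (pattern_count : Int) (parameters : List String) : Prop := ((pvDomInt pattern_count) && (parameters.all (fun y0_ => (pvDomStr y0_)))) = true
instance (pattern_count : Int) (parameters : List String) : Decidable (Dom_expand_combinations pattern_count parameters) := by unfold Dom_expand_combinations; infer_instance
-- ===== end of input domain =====

-- B iterates itertools.combinations_with_replacement instead of the full cartesian
-- product and dedups with a set of seen keys instead of scanning the result list.

-- ===== PORT A =====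

-- all([p == combination[0] for p in combination[1:]])  (combination[0] is only
-- evaluated when the tail is nonempty, so headD is exact)
def pvAllEqHead (c : List String) : Bool := (c.drop 1).all (fun p => p == c.headD "")

-- itertools.product(xss[0], xss[1], …): all choice tuples, first factor varies
-- slowest (foldr keeps the evaluation stack shallow; same list, same order)
def pvProduct (factors : List (List String)) : List (List String) :=
  factors.foldr (fun xs acc => xs.flatMap (fun a => acc.map (a :: ·))) [[]]

def expand_combinations (pattern_count : Int) (parameters : List String) : List (List String) :=
  (pvProduct (PySem.List.pyRepeat [parameters] pattern_count)).foldl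
    (fun sorted_combinations combination =>
      if pvAllEqHead combination then sorted_combinations
      else
        let sorted_combination := PySem.List.sorted combination (fun x => x)
        if sorted_combination ∈ sorted_combinations then sorted_combinations
        else sorted_combinations ++ [sorted_combination])
    []

-- ===== PORT B =====

-- itertools.combinations_with_replacement(pool, k): the k-multisets of pool as
-- tuples in CPython's (nondecreasing-index lexicographic) order: first all tuples
-- using the head element c times for c = k, k-1, …, 0, then recurse on the rest
-- (the recursion depth is the pool length, keeping the evaluation stack shallow)
def pvCWR : List String → Nat → List (List String)
  | [], k => if k = 0 then [[]] else []
  | x :: rest, k =>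
    ((List.range (k + 1)).reverse).flatMap
      (fun c => (pvCWR rest (k - c)).map (fun t => List.replicate c x ++ t))

def expand_combinations_alt (pattern_count : Int) (parameters : List String) : List (List String) :=
  if pattern_count < 2 then []
  else
    ((pvCWR parameters pattern_count.toNat).foldl
      (fun (st : List (List String) × PySem.Set (List String)) combo =>
        if pvAllEqHead combo then st
        else
          let key := PySem.List.sorted combo (fun x => x)
          if st.2.contains key then st
          else (st.1 ++ [key], st.2.add key))
      ([], PySem.Set.empty)).1

-- ===== PRECONDITION & SPEC =====
def Spec_expand_combinations (pattern_count : Int) (parameters : List String) (out : List (List String)) : Prop := out = expand_combinations_alt pattern_count parameters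
instance (pattern_count : Int) (parameters : List String) (out : List (List String)) : Decidable (Spec_expand_combinations pattern_count parameters out) := by unfold Spec_expand_combinations; infer_instance

-- ===== CLAIM (what is proved, stated in full; the proofs are below) =====
def Claim_equal_expand_combinations : Prop := ∀ (pattern_count : Int) (parameters : List String), Dom_expand_combinations pattern_count parameters → Spec_expand_combinations pattern_count parameters (expand_combinations pattern_count parameters)

-- ===== LEMMAS AND PROOFS =====

-- structural recursion on k mirroring the library's definition of
-- combinations_with_replacement (proof-side; pvCWR is proved equal to it)
def pvCWRRec : List String → Nat → List (List String)
  | _, 0 => [[]]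
  | [], _ + 1 => []
  | x :: rest, k + 1 => (pvCWRRec (x :: rest) k).map (x :: ·) ++ pvCWRRec rest (k + 1)
  termination_by pool k => (k, pool.length)

-- all index tuples over range n, lexicographic order
def pvIdxTuples (n : Nat) : Nat → List (List Nat)
  | 0 => [[]]
  | k + 1 => (List.range n).flatMap (fun i => (pvIdxTuples n k).map (i :: ·))

-- nondecreasing index tuples with entries in [m, n), lexicographic order
def pvNdIdx (n : Nat) : Nat → Nat → List (List Nat)
  | _, 0 => [[]]
  | m, k + 1 =>
    if _h : m < n then (pvNdIdx n m k).map (m :: ·) ++ pvNdIdx n (m + 1) (k + 1) else []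
  termination_by m k => (k, n - m)

-- values of an index tuple
def pvVals (pool : List String) (t : List Nat) : List String := t.map (fun i => pool.getD i "")

-- the common dedup loop over index tuples
def pvLoop (pool : List String) (acc : List (List String)) (L : List (List Nat)) : List (List String) :=
  L.foldl
    (fun acc t =>
      if pvAllEqHead (pvVals pool t) then acc
      else
        let v := PySem.List.sorted (pvVals pool t) (fun x => x)
        if v ∈ acc then acc else acc ++ [v])
    acc

theorem pvMapRangeGetD (pool : List String) :
    (List.range pool.length).map (fun i => pool.getD i "") = pool := by
  apply List.ext_getElem (by simp)
  intro i h1 h2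
  simp [List.getD_eq_getElem?_getD, List.getElem?_eq_getElem h2]

theorem pvFlatMap_range (pool : List String) (f : String → List (List String)) :
    pool.flatMap f = (List.range pool.length).flatMap (fun i => f (pool.getD i "")) := by
  conv_lhs => rw [← pvMapRangeGetD pool]
  rw [List.flatMap_map]

theorem pvProduct_cons (xs : List String) (rest : List (List String)) :
    pvProduct (xs :: rest) = xs.flatMap (fun a => (pvProduct rest).map (a :: ·)) := rfl

theorem pvProduct_replicate (pool : List String) (k : Nat) :
    pvProduct (List.replicate k pool) = (pvIdxTuples pool.length k).map (pvVals pool) := by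
  induction k with
  | zero => simp [pvProduct, pvIdxTuples, pvVals]
  | succ k ih =>
    rw [List.replicate_succ, pvProduct_cons]
    simp only [pvIdxTuples, ih]
    rw [pvFlatMap_range]
    simp [List.map_flatMap, List.map_map, Function.comp_def, pvVals]

theorem pvMem_idxTuples (n : Nat) (k : Nat) (t : List Nat) :
    t ∈ pvIdxTuples n k ↔ t.length = k ∧ ∀ i ∈ t, i < n := by
  induction k generalizing t with
  | zero =>
    simp [pvIdxTuples]
    intro h; subst h; simp
  | succ k ih =>
    simp only [pvIdxTuples, List.mem_flatMap, List.mem_map, List.mem_range]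
    constructor
    · rintro ⟨i, hi, s, hs, rfl⟩
      rcases (ih s).1 hs with ⟨hl, he⟩
      refine ⟨by simp [hl], ?_⟩
      intro j hj
      rcases List.mem_cons.1 hj with rfl | hj
      · exact hi
      · exact he j hj
    · rintro ⟨hl, he⟩
      cases t with
      | nil => simp at hl
      | cons i s =>
        exact ⟨i, he i (by simp), s, (ih s).2 ⟨by simpa using hl, fun j hj => he j (by simp [hj])⟩, rfl⟩

theorem pvPairwise_idxTuples (n : Nat) (k : Nat) :
    (pvIdxTuples n k).Pairwise (· < ·) := by
  induction k with
  | zero => simp [pvIdxTuples]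
  | succ k ih =>
    simp only [pvIdxTuples]
    rw [List.pairwise_flatMap]
    constructor
    · intro i _
      rw [List.pairwise_map]
      exact ih.imp (fun h => List.Lex.cons h)
    · apply List.Pairwise.imp ?_ (List.pairwise_lt_range (n := n))
      intro i j hij x hx y hy
      simp only [List.mem_map] at hx hy
      rcases hx with ⟨u, _, rfl⟩
      rcases hy with ⟨v, _, rfl⟩
      exact List.Lex.rel hij

-- a sorted permutation of t that differs from t is lexicographically smaller
theorem pvLex_of_sorted_perm (t u : List Nat) (hp : u.Perm t)
    (hs : u.Pairwise (· ≤ ·)) (hne : u ≠ t) : u < t := by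
  induction t generalizing u with
  | nil => exact absurd hp.eq_nil hne
  | cons a t ih =>
    cases u with
    | nil => exact absurd hp.symm.eq_nil (by simp)
    | cons b u =>
      have hba : b ≤ a := by
        have ha : a ∈ b :: u := (hp.mem_iff).2 (by simp)
        rcases List.mem_cons.1 ha with rfl | ha
        · exact le_refl _
        · exact (List.pairwise_cons.1 hs).1 a ha
      rcases lt_or_eq_of_le hba with hlt | rfl
      · exact List.Lex.rel hlt
      · have hp' : u.Perm t := (List.perm_cons b).1 hp
        have hne' : u ≠ t := by intro h; exact hne (by rw [h])
        exact List.Lex.cons (ih u hp' (List.Pairwise.of_cons hs) hne')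

-- all-equal test is permutation invariant
theorem pvAllEqHead_iff (c : List String) :
    pvAllEqHead c = true ↔ ∀ x ∈ c, ∀ y ∈ c, x = y := by
  cases c with
  | nil => simp [pvAllEqHead]
  | cons h tl =>
    simp only [pvAllEqHead, List.drop_one, List.tail_cons, List.headD_cons, List.all_eq_true,
      beq_iff_eq]
    constructor
    · intro hall x hx y hy
      have hx' : x = h := by rcases List.mem_cons.1 hx with rfl | hx; rfl; exact hall x hx
      have hy' : y = h := by rcases List.mem_cons.1 hy with rfl | hy; rfl; exact hall y hy
      rw [hx', hy']
    · intro hall x hx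
      exact hall x (by simp [hx]) h (by simp)

theorem pvAllEqHead_perm (c d : List String) (hp : c.Perm d) :
    pvAllEqHead c = pvAllEqHead d := by
  by_cases h : pvAllEqHead d = true
  · rw [h]
    rw [pvAllEqHead_iff] at h ⊢
    intro x hx y hy
    exact h x (hp.mem_iff.1 hx) y (hp.mem_iff.1 hy)
  · have h' : ¬ pvAllEqHead c = true := by
      intro hc
      rw [pvAllEqHead_iff] at hc
      apply h
      rw [pvAllEqHead_iff]
      intro x hx y hy
      exact hc x (hp.mem_iff.2 hx) y (hp.mem_iff.2 hy)
    simp only [Bool.not_eq_true] at h h'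
    rw [h, h']

-- the key dedup fact: elements whose sorted index tuple appears earlier may be dropped
theorem pvLoop_filter (pool : List String) (p : List Nat → Bool) :
    ∀ (R L : List (List Nat)) (acc : List (List String)),
    (L ++ R).Pairwise (· < ·) →
    (∀ t ∈ R, p t = false → pvAllEqHead (pvVals pool t) = false →
      ∃ s ∈ L ++ R, s < t ∧ p s = true ∧ pvAllEqHead (pvVals pool s) = false ∧
        PySem.List.sorted (pvVals pool s) (fun x => x) = PySem.List.sorted (pvVals pool t) (fun x => x)) →
    (∀ s ∈ L, p s = true → pvAllEqHead (pvVals pool s) = false →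
      PySem.List.sorted (pvVals pool s) (fun x => x) ∈ acc) →
    pvLoop pool acc R = pvLoop pool acc (R.filter p) := by
  intro R
  induction R with
  | nil => intro L acc _ _ _; rfl
  | cons t R ih =>
    intro L acc hpw hH hacc
    have hpw' : (L ++ [t] ++ R).Pairwise (· < ·) := by simpa using hpw
    by_cases hpt : p t = true
    · rw [List.filter_cons_of_pos hpt]
      show pvLoop pool _ R = pvLoop pool _ (R.filter p)
      set acc' := (if pvAllEqHead (pvVals pool t) then acc
        else
          let v := PySem.List.sorted (pvVals pool t) (fun x => x)
          if v ∈ acc then acc else acc ++ [v]) with hacc'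
      have hsub : ∀ v ∈ acc, v ∈ acc' := by
        intro v hv
        rw [hacc']
        dsimp only
        split_ifs <;> simp [hv]
      apply ih (L ++ [t]) acc' hpw'
      · intro s hs hps hae
        rcases hH s (by simp [hs]) hps hae with ⟨w, hw, hlt, hpw2, hae2, heq⟩
        refine ⟨w, ?_, hlt, hpw2, hae2, heq⟩
        simpa using hw
      · intro s hs hps hae
        rcases List.mem_append.1 hs with hs | hs
        · exact hsub _ (hacc s hs hps hae)
        · simp only [List.mem_singleton] at hs
          subst hs
          rw [hacc', if_neg (by simp [hae])]
          dsimp only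
          split_ifs with h
          · exact h
          · simp
    · have hptf : p t = false := by simpa using hpt
      rw [List.filter_cons_of_neg (by simp [hptf])]
      have hstep : pvLoop pool acc (t :: R) = pvLoop pool acc R := by
        show pvLoop pool (if pvAllEqHead (pvVals pool t) then acc else _) R = pvLoop pool acc R
        by_cases hae : pvAllEqHead (pvVals pool t) = true
        · rw [if_pos hae]
        · have hae' : pvAllEqHead (pvVals pool t) = false := by simpa using hae
          rcases hH t (by simp) hptf hae' with ⟨s, hs, hlt, hps, hae2, heq⟩
          have hsL : s ∈ L := by
            rcases List.mem_append.1 hs with hsL | hsR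
            · exact hsL
            rcases List.mem_cons.1 hsR with rfl | hsR
            · exact absurd hlt (lt_irrefl _)
            · -- t comes before s in L ++ t :: R, so t < s, contradicting s < t
              have hts : t < s := by
                have := hpw'
                rw [List.pairwise_append] at this
                exact this.2.2 t (by simp) s (by simp [hsR])
              exact absurd (lt_trans hlt hts) (lt_irrefl _)
          have hmem := hacc s hsL hps hae2
          rw [heq] at hmem
          simp [hae', hmem]
      rw [hstep]
      apply ih (L ++ [t]) acc hpw'
      · intro s hs hps hae
        rcases hH s (by simp [hs]) hps hae with ⟨w, hw, hlt, hpw2, hae2, heq⟩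
        refine ⟨w, ?_, hlt, hpw2, hae2, heq⟩
        simpa using hw
      · intro s hs hps hae
        rcases List.mem_append.1 hs with hs | hs
        · exact hacc s hs hps hae
        · simp only [List.mem_singleton] at hs
          subst hs
          rw [hps] at hptf
          cases hptf

-- A's loop equals the common loop over all index tuples
theorem pvA_eq_loop (pattern_count : Int) (parameters : List String) :
    expand_combinations pattern_count parameters =
      pvLoop parameters [] (pvIdxTuples parameters.length pattern_count.toNat) := by
  unfold expand_combinations pvLoop
  rw [PySem.List.pyRepeat_singleton, pvProduct_replicate, List.foldl_map]

-- B's paired loop equals the common loop over the sorted index tuples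
theorem pvB_pair_loop (pool : List String) (L : List (List Nat)) :
    ∀ (res : List (List String)) (seen : PySem.Set (List String)),
    (∀ v, v ∈ seen ↔ v ∈ res) →
    (L.foldl
      (fun (st : List (List String) × PySem.Set (List String)) t =>
        if pvAllEqHead (pvVals pool t) then st
        else
          let key := PySem.List.sorted (pvVals pool t) (fun x => x)
          if st.2.contains key then st
          else (st.1 ++ [key], st.2.add key))
      (res, seen)).1 = pvLoop pool res L := by
  induction L with
  | nil => intro res seen _; rfl
  | cons t L ih =>
    intro res seen hinv
    unfold pvLoop
    rw [List.foldl_cons, List.foldl_cons]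
    by_cases hae : pvAllEqHead (pvVals pool t) = true
    · rw [if_pos hae, if_pos hae]
      have := ih res seen hinv
      unfold pvLoop at this
      exact this
    · rw [if_neg hae, if_neg hae]
      dsimp only
      by_cases hmem : (PySem.List.sorted (pvVals pool t) fun x => x) ∈ res
      · rw [if_pos ((PySem.Set.contains_iff seen _).2 ((hinv _).2 hmem)), if_pos hmem]
        have := ih res seen hinv
        unfold pvLoop at this
        exact this
      · have hc : ¬ seen.contains (PySem.List.sorted (pvVals pool t) fun x => x) = true := by
          intro h
          exact hmem ((hinv _).1 ((PySem.Set.contains_iff seen _).1 h))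
        rw [if_neg hc, if_neg hmem]
        have := ih (res ++ [PySem.List.sorted (pvVals pool t) fun x => x])
          (seen.add (PySem.List.sorted (pvVals pool t) fun x => x)) ?_
        · unfold pvLoop at this
          exact this
        · intro v
          rw [PySem.Set.mem_add]
          simp [hinv v]

-- sortedness test of PySem's sort is Pairwise (≤)
theorem pvP_iff (t : List Nat) :
    (PySem.List.sorted t (fun x => x) == t) = true ↔ t.Pairwise (· ≤ ·) := by
  constructor
  · intro h
    have := PySem.List.sorted_pairwise t (fun x => x)
    rwa [beq_iff_eq.1 h] at this
  · intro h
    rw [beq_iff_eq]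
    exact PySem.List.sorted_eq_self_of_pairwise t (fun x => x) h

theorem pvP_cons (i : Nat) (t : List Nat) :
    (PySem.List.sorted (i :: t) (fun x => x) == (i :: t)) =
      ((PySem.List.sorted t (fun x => x) == t) && t.all (fun j => decide (i ≤ j))) := by
  rw [Bool.eq_iff_iff, Bool.and_eq_true, pvP_iff, pvP_iff, List.pairwise_cons, List.all_eq_true]
  constructor
  · rintro ⟨h1, h2⟩
    exact ⟨h2, fun j hj => by simpa using h1 j hj⟩
  · rintro ⟨h1, h2⟩
    exact ⟨fun j hj => by simpa using h2 j hj, h1⟩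

-- pvCWRRec over a suffix of the pool enumerates the nondecreasing index tuples
theorem pvCWRRec_eq (pool : List String) :
    ∀ (k j m : Nat), pool.length - m = j →
      pvCWRRec (pool.drop m) k = (pvNdIdx pool.length m k).map (pvVals pool) := by
  intro k
  induction k with
  | zero => intro j m _; simp [pvCWRRec, pvNdIdx, pvVals]
  | succ k ihk =>
    intro j
    induction j with
    | zero =>
      intro m hm
      have hmn : pool.length ≤ m := by omega
      rw [List.drop_eq_nil_iff.2 hmn]
      rw [pvNdIdx, dif_neg (by omega)]
      simp [pvCWRRec]
    | succ j ihj =>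
      intro m hm
      have hmn : m < pool.length := by omega
      rw [List.drop_eq_getElem_cons hmn, pvCWRRec, ← List.drop_eq_getElem_cons hmn]
      rw [pvNdIdx, dif_pos hmn, List.map_append, List.map_map]
      rw [ihk (pool.length - m) m rfl, ihj (m + 1) (by omega)]
      congr 1
      rw [List.map_map]
      apply List.map_congr_left
      intro t _
      simp [pvVals, List.getD_eq_getElem?_getD, List.getElem?_eq_getElem hmn]

-- a flatMap over range n with a lower cutoff is a flatMap over range' m (n - m)
theorem pvFilter_cutoff (n : Nat) (G : Nat → List (List Nat)) (m : Nat) :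
    (List.range n).flatMap (fun i => if m ≤ i then G i else []) =
      (List.range' m (n - m)).flatMap G := by
  induction n with
  | zero => simp
  | succ n ih =>
    rw [List.range_succ, List.flatMap_append, ih]
    by_cases h : m ≤ n
    · rw [show n + 1 - m = (n - m) + 1 from by omega, List.range'_concat,
        List.flatMap_append]
      simp [h]
    · rw [show n + 1 - m = 0 from by omega, show n - m = 0 from by omega]
      simp [h]

-- unrolling pvNdIdx along range'
theorem pvRange'_ndIdx (n k : Nat) :
    ∀ (j m : Nat), n - m = j →
      (List.range' m j).flatMap (fun i => (pvNdIdx n i k).map (i :: ·)) =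
        pvNdIdx n m (k + 1) := by
  intro j
  induction j with
  | zero =>
    intro m hm
    rw [pvNdIdx, dif_neg (by omega)]
    simp
  | succ j ih =>
    intro m hm
    have hmn : m < n := by omega
    rw [List.range'_succ, List.flatMap_cons, ih (m + 1) (by omega)]
    conv_rhs => rw [pvNdIdx]
    rw [dif_pos hmn]

-- the sorted index tuples among all index tuples are exactly pvNdIdx
theorem pvFilter_ndIdx (n : Nat) :
    ∀ (k m : Nat),
      (pvIdxTuples n k).filter
          (fun t => (PySem.List.sorted t (fun x => x) == t) && t.all (fun j => decide (m ≤ j))) =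
        pvNdIdx n m k := by
  intro k
  induction k with
  | zero =>
    intro m
    rw [pvIdxTuples, pvNdIdx, List.filter_cons]
    have hs : PySem.List.sorted ([] : List Nat) (fun x => x) = [] :=
      PySem.List.sorted_eq_self_of_pairwise [] (fun x => x) List.Pairwise.nil
    simp [hs]
  | succ k ih =>
    intro m
    rw [pvIdxTuples, List.filter_flatMap]
    have hstep : ∀ i : Nat,
        List.filter
            (fun t => (PySem.List.sorted t (fun x => x) == t) && t.all (fun j => decide (m ≤ j)))
            (List.map (i :: ·) (pvIdxTuples n k)) =
          if m ≤ i then List.map (i :: ·) (pvNdIdx n i k) else [] := by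
      intro i
      rw [List.filter_map]
      by_cases hmi : m ≤ i
      · rw [if_pos hmi, ← ih i]
        congr 1
        apply List.filter_congr
        intro t _
        simp only [Function.comp_apply, pvP_cons]
        rw [Bool.eq_iff_iff]
        simp only [Bool.and_eq_true, List.all_eq_true, List.mem_cons, decide_eq_true_eq]
        constructor
        · rintro ⟨⟨h1, h2⟩, _⟩
          exact ⟨h1, h2⟩
        · rintro ⟨h1, h2⟩
          refine ⟨⟨h1, h2⟩, ?_⟩
          intro j hj
          rcases hj with rfl | hj
          · exact hmi
          · exact le_trans hmi (h2 j hj)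
      · rw [if_neg hmi, List.map_eq_nil_iff]
        apply List.filter_eq_nil_iff.2
        intro t _
        simp only [Function.comp_apply, Bool.and_eq_true, List.all_eq_true, List.mem_cons,
          decide_eq_true_eq]
        rintro ⟨-, hall⟩
        exact hmi (hall i (Or.inl rfl))
    simp only [hstep]
    rw [pvFilter_cutoff n (fun i => List.map (i :: ·) (pvNdIdx n i k)) m]
    have : ∀ i, List.map (i :: ·) (pvNdIdx n i k) = (pvNdIdx n i k).map (i :: ·) := fun _ => rfl
    exact pvRange'_ndIdx n k (n - m) m rfl

-- the pool-structural pvCWR equals the k-structural recursion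
theorem pvCWR_eq_rec (pool : List String) : ∀ (k : Nat), pvCWR pool k = pvCWRRec pool k := by
  induction pool with
  | nil =>
    intro k
    cases k with
    | zero => simp [pvCWR, pvCWRRec]
    | succ k => simp [pvCWR, pvCWRRec]
  | cons x rest ih =>
    intro k
    induction k with
    | zero => simp [pvCWR, pvCWRRec, ih 0]
    | succ k ihk =>
      simp only [pvCWR]
      rw [List.range_succ_eq_map, List.reverse_cons, ← List.map_reverse,
        List.flatMap_append, List.flatMap_map]
      rw [pvCWRRec]
      congr 1
      · rw [← ihk]
        simp only [pvCWR]
        rw [List.map_flatMap]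
        apply List.flatMap_congr
        intro c _
        rw [Nat.succ_sub_succ, List.map_map]
        apply List.map_congr_left
        intro t _
        simp [List.replicate_succ]
      · simp [ih (k + 1)]

theorem pvB_eq_loop (pattern_count : Int) (parameters : List String)
    (h2 : ¬ pattern_count < 2) :
    expand_combinations_alt pattern_count parameters =
      pvLoop parameters []
        ((pvIdxTuples parameters.length pattern_count.toNat).filter
          (fun t => PySem.List.sorted t (fun x => x) == t)) := by
  unfold expand_combinations_alt
  rw [if_neg h2]
  have hcwr : pvCWR parameters pattern_count.toNat =
      (pvNdIdx parameters.length 0 pattern_count.toNat).map (pvVals parameters) := by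
    rw [pvCWR_eq_rec]
    have := pvCWRRec_eq parameters pattern_count.toNat parameters.length 0 rfl
    simpa using this
  rw [hcwr, ← pvFilter_ndIdx parameters.length pattern_count.toNat 0]
  rw [List.foldl_map]
  rw [pvB_pair_loop parameters _ [] PySem.Set.empty (by simp [PySem.Set.empty])]
  congr 1
  apply List.filter_congr
  intro t _
  simp

-- the main combinatorial step
theorem pvLoop_eq_filter_sorted (pool : List String) (k : Nat) :
    pvLoop pool [] (pvIdxTuples pool.length k) =
      pvLoop pool []
        ((pvIdxTuples pool.length k).filter
          (fun t => PySem.List.sorted t (fun x => x) == t)) := by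
  apply pvLoop_filter pool _ (pvIdxTuples pool.length k) [] []
  · simpa using pvPairwise_idxTuples pool.length k
  · intro t ht hpt hae
    set s := PySem.List.sorted t (fun x => x) with hs
    have hperm : s.Perm t := PySem.List.sorted_perm t (fun x => x) false
    have hsort : s.Pairwise (· ≤ ·) := PySem.List.sorted_pairwise t (fun x => x)
    have hne : s ≠ t := by
      intro h
      rw [← h] at hpt
      simp [hs] at hpt
    have hlt : s < t := pvLex_of_sorted_perm t s hperm hsort hne
    have hmem : s ∈ pvIdxTuples pool.length k := by
      rw [pvMem_idxTuples] at ht ⊢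
      exact ⟨hperm.length_eq.trans ht.1, fun i hi => ht.2 i (hperm.mem_iff.1 hi)⟩
    have hvperm : (pvVals pool s).Perm (pvVals pool t) := hperm.map _
    refine ⟨s, by simpa using hmem, hlt, ?_, ?_, ?_⟩
    · simp [hs, PySem.List.sorted_sorted]
    · rw [pvAllEqHead_perm _ _ hvperm]; exact hae
    · exact PySem.List.sorted_eq_sorted_of_perm _ _ _ (fun a b h => h) hvperm
  · intro s hs
    simp at hs

-- for pattern_count < 2 every product tuple is all-equal, so A returns []
theorem pvA_small (pattern_count : Int) (parameters : List String)
    (h2 : pattern_count < 2) :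
    expand_combinations pattern_count parameters = [] := by
  rw [pvA_eq_loop]
  have hk : pattern_count.toNat = 0 ∨ pattern_count.toNat = 1 := by omega
  rcases hk with hk | hk <;> rw [hk]
  · rfl
  · show pvLoop parameters [] ((List.range parameters.length).flatMap
      (fun i => (pvIdxTuples parameters.length 0).map (i :: ·))) = []
    unfold pvLoop
    rw [PySem.List.foldl_congr_mem (g := fun acc _ => acc), PySem.List.foldl_ignore]
    intro acc t ht
    simp only [pvIdxTuples, List.mem_flatMap, List.mem_map, List.mem_singleton] at ht
    rcases ht with ⟨i, _, s, hs, rfl⟩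
    rcases hs with rfl
    rfl

-- ===== VERDICT (by name: the statement is the Claim_ definition above) =====
theorem expand_combinations_spec : Claim_equal_expand_combinations := by
  intro pattern_count parameters _
  unfold Spec_expand_combinations
  by_cases h2 : pattern_count < 2
  · rw [pvA_small pattern_count parameters h2]
    unfold expand_combinations_alt
    rw [if_pos h2]
  · rw [pvA_eq_loop, pvB_eq_loop pattern_count parameters h2]
    exact pvLoop_eq_filter_sorted parameters pattern_count.toNat
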